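-- pv_equiv track=rewrite | github.com/HukkaMehu/Hirefy | src/utils/email_logger.py | _parse_log_content
-- ===== SOURCE A (Python) =====
-- from typing import List, Dict, Optional
--
-- def _parse_log_content(content: str) -> List[Dict[str, str]]:
--     """Parse log file content into structured entries.
--
--     Args:
--         content: Raw log file content
--
--     Returns:
--         List of dictionaries containing parsed log entries
--     """
--     entries = []
--
--     # Split content into lines and process
--     lines = content.split("\n")
--     current_entry = {}
--
--     for line in lines:
--         line = line.strip()
--
--         # Skip header lines
--         if line.startswith("=== EMAIL LOG ===") or line.startswith("Candidate:"):
--             continue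
--
--         # Empty line - skip
--         if not line:
--             continue
--
--         # Entry separator - save current entry and start new one
--         if line == "---":
--             if current_entry:
--                 entries.append(current_entry)
--                 current_entry = {}
--             continue
--
--         # Extract timestamp
--         if line.startswith("[") and line.endswith("]"):
--             current_entry["timestamp"] = line[1:-1]
--         # Extract key-value pairs
--         elif ":" in line:
--             key, value = line.split(":", 1)
--             key = key.strip().lower()
--             value = value.strip()
--             current_entry[key] = value
--
--     # Add last entry if exists
--     if current_entry:
--         entries.append(current_entry)
--
--     return entries
-- ===== SOURCE B (Python) =====
-- from typing import List, Dict
--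
-- def _parse_log_content(content: str) -> List[Dict[str, str]]:
--     # Pass 1: strip lines, drop header and empty lines.
--     stripped = [line.strip() for line in content.split("\n")]
--     lines = [l for l in stripped
--              if l and not l.startswith("=== EMAIL LOG ===") and not l.startswith("Candidate:")]
--     # Pass 2: partition into blocks separated by '---'.
--     blocks = []
--     block = []
--     for l in lines:
--         if l == "---":
--             blocks.append(block)
--             block = []
--         else:
--             block.append(l)
--     blocks.append(block)
--     # Pass 3: turn each block into a dict; keep only non-empty ones.
--     entries = []
--     for block in blocks:
--         entry = {}
--         for l in block:
--             if l.startswith("[") and l.endswith("]"):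
--                 entry["timestamp"] = l[1:-1]
--             elif ":" in l:
--                 key, value = l.split(":", 1)
--                 entry[key.strip().lower()] = value.strip()
--         if entry:
--             entries.append(entry)
--     return entries
-- ===== Notes on version B (the rewrite author's own statement) =====
-- stated objective: simpler
-- what changed: Replaces A's single stateful loop carrying a current-entry dict across lines with a three-pass pipeline: strip and filter the lines, partition them into separator-delimited blocks, then map each block to a dict and drop empty ones.
import Mathlib
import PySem

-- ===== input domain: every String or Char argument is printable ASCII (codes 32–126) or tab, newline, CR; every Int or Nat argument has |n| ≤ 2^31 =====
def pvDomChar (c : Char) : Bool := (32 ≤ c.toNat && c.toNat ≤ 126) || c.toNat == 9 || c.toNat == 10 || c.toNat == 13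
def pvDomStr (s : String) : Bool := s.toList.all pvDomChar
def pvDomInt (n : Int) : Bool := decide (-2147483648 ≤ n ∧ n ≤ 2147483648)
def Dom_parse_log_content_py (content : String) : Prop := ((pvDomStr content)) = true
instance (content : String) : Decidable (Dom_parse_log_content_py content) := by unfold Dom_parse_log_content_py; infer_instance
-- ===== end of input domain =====

-- B replaces A's single stateful loop (current-entry dict carried across lines) with a
-- three-pass pipeline — strip/filter lines, partition into '---'-separated blocks, map
-- each block to a dict and drop empty ones — for a plainer decomposition (objective: simpler).


-- ===== PORT A =====
-- the body of A's for-loop, carrying (entries so far, current entry dict)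
def pvALoopBody (st : List (List (String × String)) × PySem.Dict String String) (line : String) :
    List (List (String × String)) × PySem.Dict String String :=
  let line := PySem.Str.strip line
  if PySem.Str.startswith line "=== EMAIL LOG ===" || PySem.Str.startswith line "Candidate:" then st
  else if line = "" then st
  else if line = "---" then
    (if st.2.items ≠ [] then (st.1 ++ [st.2.items], PySem.Dict.mk []) else st)
  else if PySem.Str.startswith line "[" && PySem.Str.endswith line "]" then
    (st.1, st.2.insert "timestamp" (PySem.Str.slice line (some 1) (some (-1))))
  else if PySem.Str.isIn ":" line then
    match PySem.Str.splitMax? line ":" 1 with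
    | some (key :: value :: _) =>
        (st.1, st.2.insert (PySem.Str.lower (PySem.Str.strip key)) (PySem.Str.strip value))
    | _ => st   -- unreachable: ":" in line guarantees split(·, 1) yields two pieces
  else st

def parse_log_content_py (content : String) : List (List (String × String)) :=
  let lines := (PySem.Str.split? content "\n").getD []   -- sep "\n" ≠ "", so split? is always some
  let st := lines.foldl pvALoopBody ([], PySem.Dict.mk [])
  if st.2.items ≠ [] then st.1 ++ [st.2.items] else st.1

-- ===== PORT B =====
-- pass 1's filter predicate of Source B
def pvBKeep (l : String) : Bool :=
  !(l = "") && !PySem.Str.startswith l "=== EMAIL LOG ===" && !PySem.Str.startswith l "Candidate:"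

-- pass 2's loop body of Source B: partition on '---'
def pvBSplitStep (st : List (List String) × List String) (l : String) :
    List (List String) × List String :=
  if l = "---" then (st.1 ++ [st.2], []) else (st.1, st.2 ++ [l])

-- pass 3's per-block dict builder of Source B
def pvBlockToDict (block : List String) : PySem.Dict String String :=
  block.foldl
    (fun (entry : PySem.Dict String String) l =>
      if PySem.Str.startswith l "[" && PySem.Str.endswith l "]" then
        entry.insert "timestamp" (PySem.Str.slice l (some 1) (some (-1)))
      else if PySem.Str.isIn ":" l then
        match PySem.Str.splitMax? l ":" 1 with
        | some (key :: value :: _) =>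
            entry.insert (PySem.Str.lower (PySem.Str.strip key)) (PySem.Str.strip value)
        | _ => entry   -- unreachable: ":" in l guarantees split(·, 1) yields two pieces
      else entry)
    (PySem.Dict.mk [])

def parse_log_content_py_alt (content : String) : List (List (String × String)) :=
  -- pass 1: strip, drop header and empty lines
  let stripped := ((PySem.Str.split? content "\n").getD []).map PySem.Str.strip
  let lines := stripped.filter pvBKeep
  -- pass 2: partition into blocks on '---'
  let bs := lines.foldl pvBSplitStep ([], [])
  let blocks := bs.1 ++ [bs.2]
  -- pass 3: each block to a dict; keep non-empty ones
  List.filter (fun e => !e.isEmpty) (blocks.map (fun b => (pvBlockToDict b).items))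

-- ===== PRECONDITION & SPEC =====
def Spec_parse_log_content_py (content : String) (out : List (List (String × String))) : Prop := out = parse_log_content_py_alt content
instance (content : String) (out : List (List (String × String))) : Decidable (Spec_parse_log_content_py content out) := by unfold Spec_parse_log_content_py; infer_instance

-- ===== CLAIM (what is proved, stated in full; the proofs are below) =====
def Claim_equal_parse_log_content_py : Prop := ∀ (content : String), Dom_parse_log_content_py content → Spec_parse_log_content_py content (parse_log_content_py content)

-- ===== LEMMAS AND PROOFS =====

-- the per-line dict update both loop bodies perform on a kept line that is not '---'
def pvUpd (d : PySem.Dict String String) (l : String) : PySem.Dict String String :=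
  if PySem.Str.startswith l "[" && PySem.Str.endswith l "]" then
    d.insert "timestamp" (PySem.Str.slice l (some 1) (some (-1)))
  else if PySem.Str.isIn ":" l then
    match PySem.Str.splitMax? l ":" 1 with
    | some (key :: value :: _) =>
        d.insert (PySem.Str.lower (PySem.Str.strip key)) (PySem.Str.strip value)
    | _ => d
  else d

-- A's loop step restricted to already stripped, kept lines
def pvStepA (st : List (List (String × String)) × PySem.Dict String String) (l : String) :
    List (List (String × String)) × PySem.Dict String String :=
  if l = "---" then (if st.2.items ≠ [] then (st.1 ++ [st.2.items], PySem.Dict.mk []) else st)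
  else (st.1, pvUpd st.2 l)

def pvFinishA (st : List (List (String × String)) × PySem.Dict String String) :
    List (List (String × String)) :=
  if st.2.items ≠ [] then st.1 ++ [st.2.items] else st.1

-- the common meaning of both loops: entries produced from the kept lines, starting from dict d
def pvEntriesFrom : List String → PySem.Dict String String → List (List (String × String))
  | [], d => if d.items = [] then [] else [d.items]
  | l :: ls, d =>
    if l = "---" then
      (if d.items = [] then [] else [d.items]) ++ pvEntriesFrom ls (PySem.Dict.mk [])
    else pvEntriesFrom ls (pvUpd d l)

theorem pvDict_eta_nil (d : PySem.Dict String String) (h : d.items = []) :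
    d = PySem.Dict.mk [] := by cases d; simp_all

-- A's raw loop body equals: strip, test pvBKeep, then pvStepA
theorem pvALoopBody_eq (st : List (List (String × String)) × PySem.Dict String String)
    (line : String) :
    pvALoopBody st line
      = if pvBKeep (PySem.Str.strip line) then pvStepA st (PySem.Str.strip line) else st := by
  unfold pvALoopBody
  set l := PySem.Str.strip line with hl
  clear_value l
  by_cases h1 : PySem.Str.startswith l "=== EMAIL LOG ===" = true
  · have hk : pvBKeep l = false := by
      simp only [pvBKeep, h1, Bool.not_true, Bool.and_false, Bool.false_and]
    simp only [h1, Bool.true_or, hk]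
    simp
  · rw [Bool.not_eq_true] at h1
    by_cases h2 : PySem.Str.startswith l "Candidate:" = true
    · have hk : pvBKeep l = false := by
        simp only [pvBKeep, h2, Bool.not_true, Bool.and_false]
      simp only [h1, h2, Bool.false_or, hk]
      simp
    · rw [Bool.not_eq_true] at h2
      by_cases h0 : l = ""
      · have hk : pvBKeep l = false := by
          simp only [pvBKeep, h0, decide_true, Bool.not_true, Bool.false_and]
        simp only [h1, h2, hk]
        simp [h0]
      · have hk : pvBKeep l = true := by
          simp only [pvBKeep, h0, decide_false, Bool.not_false, h1, h2, Bool.and_self]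
        simp only [h1, h2, Bool.or_self, hk]
        have h0' : (l = "") = False := by simp [h0]
        simp only [h0', if_false]
        unfold pvStepA pvUpd
        by_cases hsep : l = "---"
        · simp [hsep]
        · simp [hsep]
          split
          · rfl
          · split
            · cases PySem.Str.splitMax? l ":" 1 with
              | none => rfl
              | some ps =>
                cases ps with
                | nil => rfl
                | cons k t =>
                  cases t with
                  | nil => rfl
                  | cons v r => rfl
            · rfl

-- fuse A's raw fold into a fold of pvStepA over the stripped, kept lines
theorem pvFoldA_fused (lines : List String)
    (st : List (List (String × String)) × PySem.Dict String String) :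
    lines.foldl pvALoopBody st
      = ((lines.map PySem.Str.strip).filter pvBKeep).foldl pvStepA st := by
  induction lines generalizing st with
  | nil => rfl
  | cons l ls ih =>
    rw [List.foldl_cons, pvALoopBody_eq]
    by_cases h : pvBKeep (PySem.Str.strip l) = true <;>
      simp [List.map, h, ih]

-- A's cleaned fold computes pvEntriesFrom
theorem pvFoldA_entries (ls : List String) (es : List (List (String × String)))
    (d : PySem.Dict String String) :
    pvFinishA (ls.foldl pvStepA (es, d)) = es ++ pvEntriesFrom ls d := by
  induction ls generalizing es d with
  | nil =>
    by_cases h : d.items = [] <;> simp [pvFinishA, pvEntriesFrom, h]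
  | cons l ls ih =>
    by_cases hsep : l = "---"
    · by_cases h : d.items = []
      · rw [pvDict_eta_nil d h] at *
        simp [pvStepA, pvEntriesFrom, hsep, ih]
      · simp [pvStepA, pvEntriesFrom, hsep, h, ih]
    · simp [pvStepA, pvEntriesFrom, hsep, ih]

-- B's block fold + map + filter computes pvEntriesFrom
theorem pvFoldB_entries (ls : List String) (bs : List (List String)) (cur : List String) :
    List.filter (fun e => !e.isEmpty)
      ((((ls.foldl pvBSplitStep (bs, cur)).1 ++ [(ls.foldl pvBSplitStep (bs, cur)).2]).map
        (fun b => (pvBlockToDict b).items)))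
      = (List.filter (fun e => !e.isEmpty) (bs.map (fun b => (pvBlockToDict b).items)))
          ++ pvEntriesFrom ls (pvBlockToDict cur) := by
  induction ls generalizing bs cur with
  | nil =>
    by_cases h : (pvBlockToDict cur).items = [] <;>
      simp [pvEntriesFrom, h]
  | cons l ls ih =>
    by_cases hsep : l = "---"
    · subst hsep
      rw [List.foldl_cons, show pvBSplitStep (bs, cur) "---" = (bs ++ [cur], []) from by
        simp [pvBSplitStep], ih (bs ++ [cur]) [],
        show (pvBlockToDict [] : PySem.Dict String String) = PySem.Dict.mk [] from rfl]
      by_cases h : (pvBlockToDict cur).items = [] <;>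
        simp [pvEntriesFrom, h, List.filter_append, List.append_assoc]
    · have hstep : pvBlockToDict (cur ++ [l]) = pvUpd (pvBlockToDict cur) l := by
        unfold pvBlockToDict pvUpd
        rw [List.foldl_append]
        rfl
      rw [List.foldl_cons, show pvBSplitStep (bs, cur) l = (bs, cur ++ [l]) from by
        simp [pvBSplitStep, hsep], ih bs (cur ++ [l]), hstep]
      simp [pvEntriesFrom, hsep]

-- ===== VERDICT (by name: the statement is the Claim_ definition above) =====
theorem parse_log_content_py_spec : Claim_equal_parse_log_content_py := by
  intro content _
  show parse_log_content_py content = parse_log_content_py_alt content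
  simp only [parse_log_content_py, parse_log_content_py_alt]
  rw [pvFoldA_fused]
  have hA := pvFoldA_entries
    ((((PySem.Str.split? content "\n").getD []).map PySem.Str.strip).filter pvBKeep)
    [] (PySem.Dict.mk [])
  have hB := pvFoldB_entries
    ((((PySem.Str.split? content "\n").getD []).map PySem.Str.strip).filter pvBKeep)
    [] []
  unfold pvFinishA at hA
  rw [show (pvBlockToDict [] : PySem.Dict String String) = PySem.Dict.mk [] from rfl] at hB
  simp only [List.map_nil, List.filter_nil, List.nil_append] at hB
  rw [hA, hB]
  simp
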